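-- pv_equiv track=rewrite | github.com/yannickloth/W33-Theory | exploration/S12_DEEP_ANALYSIS.py | intersection_product
-- ===== SOURCE A (Python) =====
-- def support(c):
--     return frozenset(i for i, x in enumerate(c) if x != 0)
--
-- def intersection_product(c1, c2):
--     """Product of values on intersection of supports."""
--     H1, H2 = support(c1), support(c2)
--     inter = H1 & H2
--     if not inter:
--         return 1
--     prod = 1
--     for i in inter:
--         prod = (prod * c1[i] * c2[i]) % 3
--     return prod
-- ===== SOURCE B (Python) =====
-- def intersection_product(c1, c2):
--     """Product of values on intersection of supports."""
--     prod = 1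
--     for x, y in zip(c1, c2):
--         if x != 0 and y != 0:
--             prod = (prod * x * y) % 3
--     return prod
-- ===== Notes on version B (the rewrite author's own statement) =====
-- stated objective: simpler
-- what changed: Replaced the build-two-support-sets-then-scan-their-intersection structure by a single fused pass over zip(c1, c2) that multiplies mod 3 whenever both components are nonzero; no sets, no index lookups and no empty-intersection special case (measured constant-factor speedup).
import Mathlib
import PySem

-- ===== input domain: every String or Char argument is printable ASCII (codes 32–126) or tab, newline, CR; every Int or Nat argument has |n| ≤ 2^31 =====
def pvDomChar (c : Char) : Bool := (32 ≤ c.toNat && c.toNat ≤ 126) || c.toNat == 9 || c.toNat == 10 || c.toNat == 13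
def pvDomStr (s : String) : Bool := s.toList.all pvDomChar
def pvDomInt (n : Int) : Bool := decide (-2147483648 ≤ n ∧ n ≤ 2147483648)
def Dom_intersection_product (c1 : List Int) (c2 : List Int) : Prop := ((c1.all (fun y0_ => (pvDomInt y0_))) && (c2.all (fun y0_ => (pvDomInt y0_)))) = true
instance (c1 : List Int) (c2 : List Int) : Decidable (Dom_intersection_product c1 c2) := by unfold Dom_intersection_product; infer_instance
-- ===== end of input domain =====

-- B replaces the two support sets and their intersection by one fused pass over zip(c1, c2) (simpler; return value proved equal).

-- ===== PORT A =====
def pySupport (c : List Int) : PySem.Set Int :=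
  PySem.Set.ofList (((PySem.List.enumerate c).filter (fun p => p.2 != 0)).map (fun p => p.1))

def intersection_product (c1 : List Int) (c2 : List Int) : Int :=
  let H1 := pySupport c1
  let H2 := pySupport c2
  let inter := PySem.Set.inter H1 H2
  if inter.isEmpty then 1
  else inter.foldl
    (fun prod i => PySem.Int.mod (prod * PySem.List.pyGetD c1 i 0 * PySem.List.pyGetD c2 i 0) 3) 1

-- ===== PORT B =====
def intersection_product_alt (c1 : List Int) (c2 : List Int) : Int :=
  (c1.zip c2).foldl
    (fun prod p => if p.1 != 0 && p.2 != 0 then PySem.Int.mod (prod * p.1 * p.2) 3 else prod) 1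

-- ===== PRECONDITION & SPEC =====
def Spec_intersection_product (c1 : List Int) (c2 : List Int) (out : Int) : Prop := out = intersection_product_alt c1 c2
instance (c1 : List Int) (c2 : List Int) (out : Int) : Decidable (Spec_intersection_product c1 c2 out) := by unfold Spec_intersection_product; infer_instance

-- ===== CLAIM (what is proved, stated in full; the proofs are below) =====
def Claim_equal_intersection_product : Prop := ∀ (c1 : List Int) (c2 : List Int), Dom_intersection_product c1 c2 → Spec_intersection_product c1 c2 (intersection_product c1 c2)

-- ===== LEMMAS AND PROOFS =====

-- the support index list, with an explicit enumerate start (proof helper)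
def suppFrom (c : List Int) (s : Int) : List Int :=
  ((PySem.List.enumerate c s).filter (fun p => p.2 != 0)).map (fun p => p.1)

theorem suppFrom_nil (s : Int) : suppFrom [] s = [] := rfl

theorem suppFrom_cons (x : Int) (t : List Int) (s : Int) :
    suppFrom (x :: t) s = (if x != 0 then [s] else []) ++ suppFrom t (s + 1) := by
  by_cases hx : x != 0 <;>
    simp [suppFrom, PySem.List.enumerate_cons, hx]

theorem le_of_mem_suppFrom {c : List Int} {s i : Int} (h : i ∈ suppFrom c s) : s ≤ i := by
  simp only [suppFrom, List.mem_map, List.mem_filter] at h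
  obtain ⟨p, ⟨hp, _⟩, rfl⟩ := h
  rw [PySem.List.mem_enumerate_iff] at hp
  obtain ⟨k, hk, rfl⟩ := hp
  omega

theorem pairwise_lt_suppFrom (c : List Int) (s : Int) : (suppFrom c s).Pairwise (· < ·) :=
  List.Pairwise.map _ (fun _ _ h => h) ((PySem.List.pairwise_lt_enumerate c s).filter _)

theorem nodup_suppFrom (c : List Int) (s : Int) : (suppFrom c s).Nodup :=
  (pairwise_lt_suppFrom c s).imp ne_of_lt

theorem pySupport_eq (c : List Int) : pySupport c = suppFrom c 0 :=
  PySem.Set.ofList_eq_self_of_nodup _ (nodup_suppFrom c 0)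

theorem pyGetD_cons_pos {α : Type} (x : α) (t : List α) (j : Int) (d : α) (hj : 1 ≤ j) :
    PySem.List.pyGetD (x :: t) j d = PySem.List.pyGetD t (j - 1) d := by
  simp only [PySem.List.pyGetD, PySem.List.pyGet?, PySem.List.pyIdx?, List.length_cons]
  rw [if_pos (by omega : (0:Int) ≤ j), if_pos (by omega : (0:Int) ≤ j - 1)]
  by_cases hlt : j - 1 < (t.length : Int)
  · rw [if_pos (by push_cast; omega), if_pos hlt]
    have hnat : j.toNat = (j - 1).toNat + 1 := by omega
    rw [hnat]
    simp only [Option.bind_some, List.getElem?_cons_succ]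
  · rw [if_neg (by push_cast; omega), if_neg hlt]
    rfl

-- the heart: the intersection indices, looked up in c1/c2, yield exactly the both-nonzero pairs of the zip
theorem inter_map_eq (c1 : List Int) : ∀ (c2 : List Int) (s : Int),
    ((suppFrom c1 s).filter (fun i => (suppFrom c2 s).contains i)).map
        (fun i => (PySem.List.pyGetD c1 (i - s) 0, PySem.List.pyGetD c2 (i - s) 0))
      = (c1.zip c2).filter (fun p => p.1 != 0 && p.2 != 0) := by
  induction c1 with
  | nil => intro c2 s; simp [suppFrom_nil]
  | cons x t1 ih =>
    intro c2 s
    cases c2 with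
    | nil =>
      simp [suppFrom_nil]
    | cons y t2 =>
      have hmemy : ∀ i ∈ suppFrom t1 (s + 1),
          (suppFrom (y :: t2) s).contains i = (suppFrom t2 (s + 1)).contains i := by
        intro i hi
        have his : s + 1 ≤ i := le_of_mem_suppFrom hi
        rw [suppFrom_cons]
        by_cases hy : y != 0
        · simp [hy, List.contains_eq_mem]; omega
        · simp [hy]
      have hs_not : s ∉ suppFrom t2 (s + 1) := fun h => by
        have := le_of_mem_suppFrom h; omega
      have htail :
          ((suppFrom t1 (s + 1)).filter (fun i => (suppFrom (y :: t2) s).contains i)).map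
              (fun i => (PySem.List.pyGetD (x :: t1) (i - s) 0, PySem.List.pyGetD (y :: t2) (i - s) 0))
            = (t1.zip t2).filter (fun p => p.1 != 0 && p.2 != 0) := by
        rw [List.filter_congr hmemy]
        rw [← ih t2 (s + 1)]
        apply List.map_congr_left
        intro i hi
        have his : s + 1 ≤ i := le_of_mem_suppFrom (List.mem_of_mem_filter hi)
        rw [pyGetD_cons_pos _ _ _ _ (by omega), pyGetD_cons_pos _ _ _ _ (by omega)]
        have : i - s - 1 = i - (s + 1) := by omega
        rw [this]
      rw [suppFrom_cons x t1 s, List.filter_append, List.map_append, List.zip_cons_cons,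
        List.filter_cons, htail]
      by_cases hx : x != 0
      · by_cases hy : y != 0
        · have hmem : s ∈ suppFrom (y :: t2) s := by
            rw [suppFrom_cons]; simp [hy]
          simp [hx, hy, hmem]
        · have hnot : s ∉ suppFrom (y :: t2) s := by
            rw [suppFrom_cons]; simp [hy]; exact hs_not
          simp [hx, hy, hnot]
      · simp [hx]

-- ===== VERDICT (by name: the statement is the Claim_ definition above) =====
theorem intersection_product_spec : Claim_equal_intersection_product := by
  intro c1 c2 _
  unfold Spec_intersection_product intersection_product intersection_product_alt
  simp only [pySupport_eq, PySem.Set.inter, PySem.Set.contains]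
  rw [← List.foldl_filter, ← inter_map_eq c1 c2 0]
  split_ifs with h
  · rw [List.isEmpty_iff] at h
    rw [h]; rfl
  · rw [List.foldl_map]
    simp
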